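-- pv_equiv track=rewrite | github.com/GitsUnreal/HumanMemory | FreeRecall/Logging/logger.py | calculate_correct_numbers
-- ===== SOURCE A (Python) =====
-- from typing import List, Dict, Optional
--
-- def calculate_correct_numbers(serial: List[int], user_input: List[Optional[int]]) -> int:
--     """
--     Calculate correct numbers using strict scoring methodology:
--     - Count each user number, but limited by how many times it appears in the serial
--     - Empty fields (None) count as WRONG answers (0 points)
--
--     Example: If serial has [1,2,3,4,5] and user writes [1,2,None,None,5]:
--     - Gets credit for 1, 2, 5 (3 correct)
--     - Empty fields for positions 3,4 count as wrong (not added to score)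
--     - Total score: 3 out of 5
--     """
--     if not serial or not user_input:
--         return 0
--
--     # Extend user_input to match serial length if needed, filling with None
--     if len(user_input) < len(serial):
--         user_input = user_input + [None] * (len(serial) - len(user_input))
--
--     # Filter out None values from user input for counting correct answers
--     valid_user_input = [num for num in user_input if num is not None]
--
--     # Count occurrences in both serial and user input
--     from collections import Counter
--     serial_counts = Counter(serial)
--     user_counts = Counter(valid_user_input)
--
--     # For each number, credit the minimum of what user wrote vs what's in serial
--     correct_count = 0
--     for number, user_count in user_counts.items():
--         if number in serial_counts:
--             # Credit up to the number of times this number appears in serial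
--             credit = min(user_count, serial_counts[number])
--             correct_count += credit
--
--     # Note: Empty fields (None values) automatically count as wrong
--     # because they don't contribute to correct_count
--     return correct_count
-- ===== SOURCE B (Python) =====
-- from collections import Counter
--
-- def calculate_correct_numbers(serial, user_input):
--     # Single pass over user_input consuming a 'remaining credit' Counter of serial.
--     remaining = Counter(serial)
--     correct_count = 0
--     for value in user_input:
--         if value is not None and remaining[value] > 0:
--             correct_count += 1
--             remaining[value] -= 1
--     return correct_count
-- ===== Notes on version B (the rewrite author's own statement) =====
-- stated objective: simpler
-- what changed: A pads user_input, builds Counters of both serial and the non-None user values and sums min(user_count, serial_count) over the user Counter's items; B builds only a Counter of serial as a remaining-credit pool and makes one direct pass over user_input, crediting and decrementing when credit remains.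
import Mathlib
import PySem

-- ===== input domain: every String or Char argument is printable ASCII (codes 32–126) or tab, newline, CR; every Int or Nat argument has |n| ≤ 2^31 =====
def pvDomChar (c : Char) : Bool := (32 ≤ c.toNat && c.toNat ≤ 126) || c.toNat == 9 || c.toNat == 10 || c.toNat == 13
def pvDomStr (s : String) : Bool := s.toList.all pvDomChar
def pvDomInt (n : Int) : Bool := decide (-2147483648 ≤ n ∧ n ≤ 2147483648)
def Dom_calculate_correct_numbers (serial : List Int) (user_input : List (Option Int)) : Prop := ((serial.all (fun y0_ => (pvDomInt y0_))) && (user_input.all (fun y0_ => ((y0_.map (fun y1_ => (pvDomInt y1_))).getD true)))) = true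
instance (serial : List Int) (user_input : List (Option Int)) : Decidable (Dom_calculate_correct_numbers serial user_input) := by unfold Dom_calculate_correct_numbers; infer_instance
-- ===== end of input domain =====

-- B replaces A's two Counters and min-sum over distinct user values by a single pass over
-- user_input consuming a 'remaining credit' Counter of serial (objective: simpler; same value).

-- ===== PORT A =====
def calculate_correct_numbers (serial : List Int) (user_input : List (Option Int)) : Int :=
  if serial = [] ∨ user_input = [] then 0
  else
    let user_input' :=
      if user_input.length < serial.length then
        user_input ++ List.replicate (serial.length - user_input.length) none
      else user_input
    let valid_user_input := user_input'.filterMap id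
    let serial_counts := PySem.Dict.counter serial
    let user_counts := PySem.Dict.counter valid_user_input
    user_counts.items.foldl
      (fun correct_count p =>
        if serial_counts.contains p.1 then
          correct_count + min p.2 (serial_counts.getD p.1 0)
        else correct_count) 0

-- ===== PORT B =====
-- the loop of Source B: consume remaining credit left to right
def pvGoB (remaining : PySem.Dict Int Int) (correct_count : Int) :
    List (Option Int) → Int
  | [] => correct_count
  | none :: rest => pvGoB remaining correct_count rest
  | some v :: rest =>
    if remaining.getD v 0 > 0 then
      pvGoB (remaining.modify v 0 (· - 1)) (correct_count + 1) rest
    else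
      pvGoB remaining correct_count rest

def calculate_correct_numbers_alt (serial : List Int) (user_input : List (Option Int)) : Int :=
  pvGoB (PySem.Dict.counter serial) 0 user_input

-- ===== PRECONDITION & SPEC =====
def Spec_calculate_correct_numbers (serial : List Int) (user_input : List (Option Int)) (out : Int) : Prop := out = calculate_correct_numbers_alt serial user_input
instance (serial : List Int) (user_input : List (Option Int)) (out : Int) : Decidable (Spec_calculate_correct_numbers serial user_input out) := by unfold Spec_calculate_correct_numbers; infer_instance

-- ===== CLAIM (what is proved, stated in full; the proofs are below) =====
def Claim_equal_calculate_correct_numbers : Prop := ∀ (serial : List Int) (user_input : List (Option Int)), Dom_calculate_correct_numbers serial user_input → Spec_calculate_correct_numbers serial user_input (calculate_correct_numbers serial user_input)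

-- ===== LEMMAS AND PROOFS =====

-- the common mathematical value: for each distinct valid user value, min(user count, credit in d)
def pvFm (valid : List Int) (d : PySem.Dict Int Int) : Int :=
  ∑ v ∈ valid.toFinset, min ((valid.count v : Int)) (d.getD v 0)

theorem pvFm_cons_pos (x : Int) (r : List Int) (d : PySem.Dict Int Int)
    (h : 0 < d.getD x 0) :
    pvFm (x :: r) d = 1 + pvFm r (d.modify x 0 (· - 1)) := by
  unfold pvFm
  have hd : ∀ v, (d.modify x 0 (· - 1)).getD v 0 = if v = x then d.getD x 0 - 1 else d.getD v 0 := by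
    intro v; rw [PySem.Dict.getD_modify]
  by_cases hx : x ∈ r
  · have hins : (x :: r).toFinset = r.toFinset := by
      simp [List.toFinset_cons, Finset.insert_eq_self.mpr (List.mem_toFinset.mpr hx)]
    rw [hins]
    have hmem : x ∈ r.toFinset := List.mem_toFinset.mpr hx
    rw [← Finset.add_sum_erase _ _ hmem, ← Finset.add_sum_erase _ _ hmem]
    have h1 : ∑ v ∈ r.toFinset.erase x, min (((x :: r).count v : Int)) (d.getD v 0)
        = ∑ v ∈ r.toFinset.erase x, min ((r.count v : Int)) ((d.modify x 0 (· - 1)).getD v 0) := by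
      apply Finset.sum_congr rfl
      intro v hv
      have hne : v ≠ x := (Finset.mem_erase.mp hv).1
      rw [hd, if_neg hne]
      simp [Ne.symm hne]
    rw [h1, hd, if_pos rfl, List.count_cons_self]
    push_cast
    omega
  · have hnm : x ∉ r.toFinset := fun hc => hx (List.mem_toFinset.mp hc)
    rw [List.toFinset_cons, Finset.sum_insert hnm]
    have h1 : ∑ v ∈ r.toFinset, min (((x :: r).count v : Int)) (d.getD v 0)
        = ∑ v ∈ r.toFinset, min ((r.count v : Int)) ((d.modify x 0 (· - 1)).getD v 0) := by
      apply Finset.sum_congr rfl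
      intro v hv
      have hne : v ≠ x := fun hc => hnm (hc ▸ hv)
      rw [hd, if_neg hne]
      simp [Ne.symm hne]
    rw [h1, List.count_cons_self, List.count_eq_zero_of_not_mem hx]
    push_cast
    omega

theorem pvFm_cons_zero (x : Int) (r : List Int) (d : PySem.Dict Int Int)
    (h : d.getD x 0 = 0) :
    pvFm (x :: r) d = pvFm r d := by
  unfold pvFm
  by_cases hx : x ∈ r
  · have hins : (x :: r).toFinset = r.toFinset := by
      simp [List.toFinset_cons, Finset.insert_eq_self.mpr (List.mem_toFinset.mpr hx)]
    rw [hins]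
    apply Finset.sum_congr rfl
    intro v hv
    by_cases hne : v = x
    · subst hne
      rw [h, List.count_cons_self]
      push_cast
      omega
    · simp [Ne.symm hne]
  · have hnm : x ∉ r.toFinset := fun hc => hx (List.mem_toFinset.mp hc)
    rw [List.toFinset_cons, Finset.sum_insert hnm]
    rw [List.count_cons_self, List.count_eq_zero_of_not_mem hx, h]
    have h1 : ∑ v ∈ r.toFinset, min (((x :: r).count v : Int)) (d.getD v 0)
        = ∑ v ∈ r.toFinset, min ((r.count v : Int)) (d.getD v 0) := by
      apply Finset.sum_congr rfl
      intro v hv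
      have hne : v ≠ x := fun hc => hnm (hc ▸ hv)
      simp [Ne.symm hne]
    rw [h1]
    simp

theorem pvGoB_eq (ui : List (Option Int)) (d : PySem.Dict Int Int) (acc : Int)
    (hnn : ∀ v, 0 ≤ d.getD v 0) :
    pvGoB d acc ui = acc + pvFm (ui.filterMap id) d := by
  induction ui generalizing d acc with
  | nil => simp [pvGoB, pvFm]
  | cons o rest ih =>
    cases o with
    | none => simpa [pvGoB] using ih d acc hnn
    | some x =>
      have hfm : (List.filterMap id (some x :: rest)) = x :: List.filterMap id rest := rfl
      rw [hfm]
      simp only [pvGoB]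
      by_cases h : d.getD x 0 > 0
      · rw [if_pos h]
        have hnn' : ∀ v, 0 ≤ (d.modify x 0 (· - 1)).getD v 0 := by
          intro v
          rw [PySem.Dict.getD_modify]
          split_ifs with hv
          · subst hv; omega
          · exact hnn v
        rw [ih _ _ hnn', pvFm_cons_pos x _ d h]
        ring
      · rw [if_neg h]
        rw [ih d acc hnn, pvFm_cons_zero x _ d (le_antisymm (by omega) (hnn x))]

theorem A_counter_fold (serial valid : List Int) :
    ((PySem.Dict.counter valid).items.foldl
      (fun correct_count p =>
        if (PySem.Dict.counter serial).contains p.1 then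
          correct_count + min p.2 ((PySem.Dict.counter serial).getD p.1 0)
        else correct_count) 0) = pvFm valid (PySem.Dict.counter serial) := by
  have hfn : (fun (correct_count : Int) (p : Int × Int) =>
        if (PySem.Dict.counter serial).contains p.1 then
          correct_count + min p.2 ((PySem.Dict.counter serial).getD p.1 0)
        else correct_count)
      = (fun correct_count p => correct_count +
          (if (PySem.Dict.counter serial).contains p.1 then
            min p.2 ((PySem.Dict.counter serial).getD p.1 0) else 0)) := by
    funext acc p; split_ifs <;> simp
  rw [hfn, PySem.List.foldl_add, PySem.Dict.items_counter, List.map_map]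
  have hterm : ((fun p : Int × Int =>
        if (PySem.Dict.counter serial).contains p.1 then
          min p.2 ((PySem.Dict.counter serial).getD p.1 0) else 0) ∘
        (fun k => (k, (valid.count k : Int))))
      = fun k => min ((valid.count k : Int)) ((PySem.Dict.counter serial).getD k 0) := by
    funext k
    simp only [Function.comp]
    rw [PySem.Dict.contains_counter]
    split_ifs with hc
    · rfl
    · rw [PySem.Dict.getD_counter]
      have : serial.count k = 0 := by
        rw [List.count_eq_zero]
        intro hm
        exact hc (by simpa using hm)
      rw [this]
      have : (0:Int) ≤ (valid.count k : Int) := Int.natCast_nonneg _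
      omega
  rw [hterm]
  unfold pvFm
  rw [← List.sum_toFinset _ (PySem.Set.nodup_ofList valid)]
  have : (PySem.Set.ofList valid).toFinset = valid.toFinset := by
    ext v; simp [PySem.Set.mem_ofList]
  rw [this]
  ring

theorem pvFm_counter_nil (valid : List Int) :
    pvFm valid (PySem.Dict.counter ([] : List Int)) = 0 := by
  unfold pvFm
  apply Finset.sum_eq_zero
  intro v _
  rw [PySem.Dict.getD_counter]
  simp

theorem A_eq_pvFm (serial : List Int) (user_input : List (Option Int)) :
    calculate_correct_numbers serial user_input
      = pvFm (user_input.filterMap id) (PySem.Dict.counter serial) := by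
  unfold calculate_correct_numbers
  split_ifs with hg hlen
  · rcases hg with hs | hu
    · subst hs; rw [pvFm_counter_nil]
    · subst hu; simp [pvFm]
  · have hpad : (user_input ++
        List.replicate (serial.length - user_input.length) none).filterMap id
        = user_input.filterMap id := by
      simp [List.filterMap_append]
    exact (A_counter_fold serial ((user_input ++
      List.replicate (serial.length - user_input.length) none).filterMap id)).trans
      (by rw [hpad])
  · exact A_counter_fold serial _

-- ===== VERDICT (by name: the statement is the Claim_ definition above) =====
theorem calculate_correct_numbers_spec : Claim_equal_calculate_correct_numbers := by
  intro serial ui _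
  unfold Spec_calculate_correct_numbers calculate_correct_numbers_alt
  rw [A_eq_pvFm, pvGoB_eq _ _ _ (fun v => by
    rw [PySem.Dict.getD_counter]; exact Int.natCast_nonneg _)]
  simp
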